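-- pv_equiv track=rewrite | github.com/YuchenLi27/Leetcode_question | Greedy/letter_transfer.py | get_final_length
-- ===== SOURCE A (Python) =====
-- def get_final_length(arrs, moves):
--     # res = []
--     # total_length = 0
--     # if moves // 26 == 0:
--     #     for i in range(len(arr)):
--     #         change_lim = ord('z') - ord(arr[i])
--     #         if change_lim <= moves:
--     #             total_length += 1
--     # else:
--
--     while moves > 0:
--         new_arr = []
--         moves -= 1
--         for ele in arrs:
--             if ele == "z":
--                 new_arr.append("a")
--                 new_arr.append("b")
--             else:
--                 move_ele = ord(ele) + 1
--                 after_mv_ele = chr(move_ele)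
--                 new_arr.append(after_mv_ele)
--         arrs = new_arr
--     return arrs
-- ===== SOURCE B (Python) =====
-- def get_final_length(arrs, moves):
--     if moves <= 0:
--         return list(arrs)
--     res = []
--     for ele in arrs:
--         stack = [(ele, moves)]
--         while stack:
--             c, m = stack.pop()
--             if m == 0:
--                 res.append(c)
--             elif c == "z":
--                 stack.append(("b", m - 1))
--                 stack.append(("a", m - 1))
--             else:
--                 stack.append((chr(ord(c) + 1), m - 1))
--     return res
-- ===== Notes on version B (the rewrite author's own statement) =====
-- stated objective: alternative
-- what changed: Instead of rebuilding the whole list once per move (per-round breadth-first rewriting), B expands each original element independently to its full moves-step block with an explicit per-element stack (depth-first) and concatenates the blocks; moves<=0 returns the elements unchanged.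
import Mathlib
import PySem

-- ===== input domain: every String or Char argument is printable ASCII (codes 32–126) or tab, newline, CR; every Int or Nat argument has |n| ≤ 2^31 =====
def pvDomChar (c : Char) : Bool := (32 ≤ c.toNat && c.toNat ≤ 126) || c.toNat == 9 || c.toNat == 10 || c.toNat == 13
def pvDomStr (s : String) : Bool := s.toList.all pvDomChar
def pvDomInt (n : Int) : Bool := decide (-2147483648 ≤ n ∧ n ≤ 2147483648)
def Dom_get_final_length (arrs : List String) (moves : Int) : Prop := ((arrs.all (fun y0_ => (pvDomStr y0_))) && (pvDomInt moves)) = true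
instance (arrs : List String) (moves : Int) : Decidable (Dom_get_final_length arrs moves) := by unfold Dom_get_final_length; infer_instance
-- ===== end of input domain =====

-- B replaces A's per-round rewriting of the whole list by an independent per-element
-- expansion with an explicit stack; same return value (alternative decomposition, no speed claim).

-- chr(ord(ele) + 1): exact for single-character strings (the only ones Pre_ admits
-- when moves > 0; Python's ord raises TypeError otherwise, "" is junk outside Pre_).
def pvIncStr (ele : String) : String :=
  match ele.toList with
  | [c] => String.ofList [Char.ofNat (c.toNat + 1)]
  | _ => ""

-- ===== PORT A =====
-- one round: 'new_arr = []; for ele in arrs: …' (foldl accumulating new_arr)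
def pvStepA (arrs : List String) : List String :=
  arrs.foldl (fun new_arr ele =>
    if ele = "z" then (new_arr ++ ["a"]) ++ ["b"]
    else new_arr ++ [pvIncStr ele]) []

-- 'while moves > 0': recursion on moves, measured by moves.toNat
def get_final_length (arrs : List String) (moves : Int) : List String :=
  if h : moves > 0 then get_final_length (pvStepA arrs) (moves - 1) else arrs
termination_by moves.toNat
decreasing_by omega

-- ===== PORT B =====
-- the 'while stack' loop; the stack's head is Python's last element (the one .pop() removes)
def pvRunStack (res : List String) (st : List (String × Nat)) : List String :=
  match st with
  | [] => res
  | (c, m) :: rest =>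
    if hm : m = 0 then pvRunStack (res ++ [c]) rest
    else if c = "z" then pvRunStack res (("a", m - 1) :: ("b", m - 1) :: rest)
    else pvRunStack res ((pvIncStr c, m - 1) :: rest)
termination_by (st.map (fun p => 3 ^ p.2)).sum
decreasing_by
  · simp
  · obtain ⟨k, rfl⟩ : ∃ k, m = k + 1 := ⟨m - 1, by omega⟩
    have h1 : (0:ℕ) < 3 ^ k := by positivity
    simp [pow_succ]; omega
  · obtain ⟨k, rfl⟩ : ∃ k, m = k + 1 := ⟨m - 1, by omega⟩
    simp [pow_succ]

def get_final_length_alt (arrs : List String) (moves : Int) : List String :=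
  if moves ≤ 0 then arrs
  else arrs.foldl (fun res ele => pvRunStack res [(ele, moves.toNat)]) []

-- ===== PRECONDITION & SPEC =====
-- Pre_ excludes exactly the inputs where Python A raises: when moves > 0, ord(ele)
-- raises TypeError on any element that is not a single character ("z" is one character).
def Pre_get_final_length (arrs : List String) (moves : Int) : Prop :=
  moves ≤ 0 ∨ ∀ s ∈ arrs, s.length = 1
instance (arrs : List String) (moves : Int) : Decidable (Pre_get_final_length arrs moves) := by
  unfold Pre_get_final_length; infer_instance

def pvWitness_get_final_length : List String × Int := (["a", "z", "y"], 3)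

def Spec_get_final_length (arrs : List String) (moves : Int) (out : List String) : Prop := out = get_final_length_alt arrs moves
instance (arrs : List String) (moves : Int) (out : List String) : Decidable (Spec_get_final_length arrs moves out) := by unfold Spec_get_final_length; infer_instance

-- ===== CLAIM (what is proved, stated in full; the proofs are below) =====
def Claim_equal_get_final_length : Prop := ∀ (arrs : List String) (moves : Int), Dom_get_final_length arrs moves → Pre_get_final_length arrs moves → Spec_get_final_length arrs moves (get_final_length arrs moves)

-- ===== LEMMAS AND PROOFS =====

-- the full moves-step expansion of one element (proof device shared by both directions)
def pvExp (c : String) : Nat → List String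
  | 0 => [c]
  | n + 1 => if c = "z" then pvExp "a" n ++ pvExp "b" n else pvExp (pvIncStr c) n

theorem pvStepA_go (arrs : List String) : ∀ (acc : List String),
    arrs.foldl (fun new_arr ele =>
      if ele = "z" then (new_arr ++ ["a"]) ++ ["b"] else new_arr ++ [pvIncStr ele]) acc
      = acc ++ arrs.flatMap (fun c => if c = "z" then ["a", "b"] else [pvIncStr c]) := by
  induction arrs with
  | nil => simp
  | cons x xs ih =>
      intro acc
      simp only [List.foldl_cons, List.flatMap_cons, ih]
      by_cases hz : x = "z" <;> simp [hz]

theorem pvStepA_eq_flatMap (arrs : List String) :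
    pvStepA arrs = arrs.flatMap (fun c => if c = "z" then ["a", "b"] else [pvIncStr c]) := by
  unfold pvStepA
  rw [pvStepA_go]; simp

theorem pvRunStack_eq (res : List String) (st : List (String × Nat)) :
    pvRunStack res st = res ++ st.flatMap (fun p => pvExp p.1 p.2) := by
  induction res, st using pvRunStack.induct with
  | case1 res => simp [pvRunStack]
  | case2 res c rest ih =>
      rw [pvRunStack]; simp [ih, pvExp]
  | case3 res m rest hm ih =>
      rw [pvRunStack]
      simp only [reduceIte, hm, dite_false, ih]
      obtain ⟨k, rfl⟩ : ∃ k, m = k + 1 := ⟨m - 1, by omega⟩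
      simp [pvExp]
  | case4 res c m rest hm hz ih =>
      rw [pvRunStack]
      simp only [hm, hz, dite_false, if_false, ih]
      obtain ⟨k, rfl⟩ : ∃ k, m = k + 1 := ⟨m - 1, by omega⟩
      simp [pvExp, hz]

theorem pvIterA_eq (n : Nat) : ∀ (arrs : List String) (moves : Int), moves.toNat = n →
    get_final_length arrs moves = arrs.flatMap (fun c => pvExp c n) := by
  induction n with
  | zero =>
      intro arrs moves h
      rw [get_final_length]
      have : ¬ moves > 0 := by omega
      simp [this, pvExp]
  | succ k ih =>
      intro arrs moves h
      rw [get_final_length]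
      have hpos : moves > 0 := by omega
      simp only [hpos, dite_true]
      rw [ih (pvStepA arrs) (moves - 1) (by omega), pvStepA_eq_flatMap, List.flatMap_assoc]
      congr 1; funext c
      by_cases hz : c = "z" <;> simp [hz, pvExp]

theorem pvAlt_eq (arrs : List String) (moves : Int) (hpos : ¬ moves ≤ 0) :
    get_final_length_alt arrs moves = arrs.flatMap (fun c => pvExp c moves.toNat) := by
  unfold get_final_length_alt
  simp only [hpos, if_false]
  induction arrs using List.reverseRecOn with
  | nil => simp
  | append_singleton xs x ih =>
      rw [List.foldl_append, List.flatMap_append]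
      simp only [List.foldl_cons, List.foldl_nil, pvRunStack_eq]; simp [List.flatMap_def]

-- ===== VERDICT (by name: the statement is the Claim_ definition above) =====
theorem get_final_length_spec : Claim_equal_get_final_length := by
  intro arrs moves _ _
  unfold Spec_get_final_length
  by_cases h : moves ≤ 0
  · rw [get_final_length]
    have : ¬ moves > 0 := by omega
    simp [this, get_final_length_alt, h]
  · rw [pvAlt_eq arrs moves h, pvIterA_eq moves.toNat arrs moves rfl]
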